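-- pv_equiv track=rewrite | github.com/cmps143-nlp/homework_8 | hw7-nic.py | baseline
-- ===== SOURCE A (Python) =====
-- import zipfile, argparse, os, sys, nltk, operator, re
--
-- def get_bow(tagged_tokens, stopwords):
--     return set([t[0].lower() for t in tagged_tokens if t[0].lower() not in stopwords and t[1] not in '.'])
--
-- def baseline(qbow, sentences, stopwords):
--
--
--     # Collect all the candidate answers
--     answers = []
--     for sent in sentences:
--         # A list of all the word tokens in the sentence
--         sbow = get_bow(sent, stopwords)
--
--         # Count the # of overlapping words between the Q and the A
--         # & is the set intersection operator
--         overlap = len(qbow & sbow)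
--
--         if overlap > 0:
--             answers.append((overlap, sent))
--
--     # Sort the results by the first element of the tuple (i.e., the count)
--     # Sort answers from smallest to largest by default, so reverse it
--     answers = sorted(answers, key=operator.itemgetter(0), reverse=True)
--
--     # Return the best answer
--     if len(answers) > 0:
--         best_answer = (answers[0])[1]
--     # return empty string if no overlap found
--     else:
--         best_answer = []
--
--     # trim qbow words, likely not in answer
--     best_answer = [(w,p) for w,p in best_answer if w not in qbow]
--
--     return best_answer
-- ===== SOURCE B (Python) =====
-- def get_bow(tagged_tokens, stopwords):
--     return set([t[0].lower() for t in tagged_tokens if t[0].lower() not in stopwords and t[1] not in '.'])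
--
-- def baseline(qbow, sentences, stopwords):
--     # single pass: keep the best (first-maximal) sentence by overlap, no answers list, no sort
--     best_overlap = 0
--     best = []
--     for sent in sentences:
--         overlap = len(qbow & get_bow(sent, stopwords))
--         if overlap > best_overlap:
--             best_overlap = overlap
--             best = sent
--     return [(w, p) for w, p in best if w not in qbow]
-- ===== Notes on version B (the rewrite author's own statement) =====
-- stated objective: simpler
-- what changed: Replaces the collect-all-answers list plus stable reverse sort and head with a single argmax pass keeping (best_overlap, best_sentence), using strict > so the earliest maximal sentence wins exactly as the stable sort did.
import Mathlib
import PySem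

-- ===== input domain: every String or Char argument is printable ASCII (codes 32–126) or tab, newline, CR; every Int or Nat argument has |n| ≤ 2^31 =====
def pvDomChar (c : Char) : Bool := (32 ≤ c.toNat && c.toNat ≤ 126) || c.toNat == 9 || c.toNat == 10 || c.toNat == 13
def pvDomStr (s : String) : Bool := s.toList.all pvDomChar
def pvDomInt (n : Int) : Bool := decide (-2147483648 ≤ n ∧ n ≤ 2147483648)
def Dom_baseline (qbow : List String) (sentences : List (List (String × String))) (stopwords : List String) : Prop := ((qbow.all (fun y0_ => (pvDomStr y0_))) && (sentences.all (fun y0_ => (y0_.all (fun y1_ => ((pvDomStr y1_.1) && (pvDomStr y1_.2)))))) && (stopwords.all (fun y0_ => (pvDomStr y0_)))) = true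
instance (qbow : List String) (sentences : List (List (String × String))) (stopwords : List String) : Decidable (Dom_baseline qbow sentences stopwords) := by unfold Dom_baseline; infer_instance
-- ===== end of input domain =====

-- B replaces A's collect-all-candidates list + stable reverse sort + head by a single argmax pass (strict >, so the earliest maximal sentence wins like the stable sort); objective: simpler.

-- ===== PORT A =====
-- get_bow(tagged_tokens, stopwords): set of lowered first components whose lowering is not a stopword and whose tag is not a substring of "."
def pvGetBow (tagged_tokens : List (String × String)) (stopwords : List String) : PySem.Set String :=
  PySem.Set.ofList ((tagged_tokens.filter
      (fun t => !(stopwords.contains (PySem.Str.lower t.1)) && !(PySem.Str.isIn t.2 "."))).map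
      (fun t => PySem.Str.lower t.1))

def baseline (qbow : List String) (sentences : List (List (String × String))) (stopwords : List String) : List (String × String) :=
  let answers : List (Int × List (String × String)) :=
    sentences.foldl (fun acc sent =>
      let sbow := pvGetBow sent stopwords
      let overlap : Int := PySem.Set.len (PySem.Set.inter qbow sbow)
      if overlap > 0 then acc ++ [(overlap, sent)] else acc) []
  let answers := PySem.List.sorted answers (fun p => p.1) true
  let best_answer : List (String × String) :=
    match answers with
    | [] => []
    | a :: _ => a.2
  best_answer.filter (fun wp => !(qbow.contains wp.1))

-- ===== PORT B =====
def baseline_alt (qbow : List String) (sentences : List (List (String × String))) (stopwords : List String) : List (String × String) :=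
  let best : Int × List (String × String) :=
    sentences.foldl (fun st sent =>
      let overlap : Int := PySem.Set.len (PySem.Set.inter qbow (pvGetBow sent stopwords))
      if st.1 < overlap then (overlap, sent) else st) (0, [])
  best.2.filter (fun wp => !(qbow.contains wp.1))

-- ===== PRECONDITION & SPEC =====
def Spec_baseline (qbow : List String) (sentences : List (List (String × String))) (stopwords : List String) (out : List (String × String)) : Prop := out = baseline_alt qbow sentences stopwords
instance (qbow : List String) (sentences : List (List (String × String))) (stopwords : List String) (out : List (String × String)) : Decidable (Spec_baseline qbow sentences stopwords out) := by unfold Spec_baseline; infer_instance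

-- ===== CLAIM (what is proved, stated in full; the proofs are below) =====
def Claim_equal_baseline : Prop := ∀ (qbow : List String) (sentences : List (List (String × String))) (stopwords : List String), Dom_baseline qbow sentences stopwords → Spec_baseline qbow sentences stopwords (baseline qbow sentences stopwords)

-- ===== LEMMAS AND PROOFS =====

-- first-argmax step on optional accumulator (characterises the head of A's stable reverse sort)
def pvFmStep {α : Type} (st : Option (Int × α)) (x : Int × α) : Option (Int × α) :=
  match st with
  | none => some x
  | some m => if m.1 < x.1 then some x else st

theorem pv_head?_insertBy {α : Type} (before : α → α → Bool) (x : α) (ys : List α) :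
    (PySem.List.insertBy before x ys).head? =
      some (match ys with | [] => x | y :: _ => if before x y then x else y) := by
  cases ys with
  | nil => simp [PySem.List.insertBy]
  | cons y t => simp [PySem.List.insertBy]; split_ifs <;> simp

-- the head of sorted(l, key=fst, reverse=True) is the FIRST element with maximal first component
theorem pv_head_sorted_rev {α : Type} (l : List (Int × α)) :
    (PySem.List.sorted l (fun p => p.1) true).head? = l.foldl pvFmStep none := by
  induction l using List.reverseRecOn with
  | nil => simp [PySem.List.sorted]
  | append_singleton l x ih =>
    rw [PySem.List.sorted_rev_eq_foldl_insertBy] at *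
    rw [List.foldl_append, List.foldl_append]
    set acc := List.foldl (fun acc x => PySem.List.insertBy (fun a b : Int × α => decide (b.1 < a.1)) x acc) [] l with hacc
    simp only [List.foldl_cons, List.foldl_nil]
    rw [pv_head?_insertBy]
    cases h : acc with
    | nil => rw [h] at ih; simp at ih; rw [← ih]; simp [pvFmStep]
    | cons y t =>
      rw [h] at ih; simp at ih; rw [← ih]
      simp only [pvFmStep]
      split_ifs <;> simp_all

-- the guarded argmax fold (A side, on overlaps) and B's fold stay related step by step
def pvRel {α : Type} (z : α) (o : Option (Int × α)) (st : Int × α) : Prop :=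
  (o = none ∧ st = (0, z)) ∨ (∃ m, o = some m ∧ st = m ∧ 0 < m.1)

theorem pv_loop {α : Type} (z : α) (ov : α → Int) :
    ∀ (l : List α) (o : Option (Int × α)) (st : Int × α), pvRel z o st →
      pvRel z (l.foldl (fun o x => if 0 < ov x then pvFmStep o (ov x, x) else o) o)
              (l.foldl (fun st x => if st.1 < ov x then (ov x, x) else st) st) := by
  intro l
  induction l with
  | nil => intro o st h; exact h
  | cons x t ih =>
    intro o st h
    apply ih
    rcases h with ⟨ho, hst⟩ | ⟨m, ho, hst, hm⟩
    · subst ho; subst hst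
      by_cases hx : 0 < ov x
      · right; exact ⟨(ov x, x), by simp [hx, pvFmStep], by simp [hx], hx⟩
      · left; exact ⟨by simp [hx], by simp [hx]⟩
    · subst ho; subst hst
      by_cases hmx : st.1 < ov x
      · have hx : 0 < ov x := by omega
        right; exact ⟨(ov x, x), by simp [hmx, pvFmStep, hx], by simp [hmx], hx⟩
      · right
        refine ⟨st, ?_, by simp [hmx], hm⟩
        by_cases hx : 0 < ov x
        · simp [hx, pvFmStep, hmx]
        · simp [hx]

-- ===== VERDICT (by name: the statement is the Claim_ definition above) =====
theorem baseline_spec : Claim_equal_baseline := by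
  intro qbow sentences stopwords _
  unfold Spec_baseline baseline baseline_alt
  set ov : List (String × String) → Int :=
    fun sent => PySem.Set.len (PySem.Set.inter qbow (pvGetBow sent stopwords)) with hov
  simp only []
  -- A's answers list is the filtered, mapped sentence list
  have hans : sentences.foldl (fun acc sent =>
        if PySem.Set.len (PySem.Set.inter qbow (pvGetBow sent stopwords)) > 0 then
          acc ++ [(PySem.Set.len (PySem.Set.inter qbow (pvGetBow sent stopwords)), sent)]
        else acc) [] =
      (sentences.filter (fun s => decide (0 < ov s))).map (fun s => (ov s, s)) := by
    rw [PySem.List.foldl_append_ite (p := fun s => 0 < ov s) (f := fun s => (ov s, s))]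
    simp
  rw [hans]
  -- head of the stable reverse sort = guarded argmax fold over the sentences
  have hhead := pv_head_sorted_rev ((sentences.filter (fun s => decide (0 < ov s))).map (fun s => (ov s, s)))
  rw [List.foldl_map, ← PySem.List.foldl_ite_eq_foldl_filter (p := fun s => 0 < ov s)
        (f := fun o s => pvFmStep o (ov s, s))] at hhead
  -- relate to B's fold
  have hrel := pv_loop ([] : List (String × String)) ov sentences none ((0 : Int), ([] : List (String × String)))
      (Or.inl ⟨rfl, rfl⟩)
  rcases hrel with ⟨ho, hst⟩ | ⟨m, ho, hst, _⟩
  · rw [ho] at hhead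
    rw [hst]
    rcases hs : PySem.List.sorted ((sentences.filter (fun s => decide (0 < ov s))).map (fun s => (ov s, s))) (fun p => p.1) true with _ | ⟨a, t⟩
    · simp
    · rw [hs] at hhead; simp at hhead
  · rw [ho] at hhead
    rw [hst]
    rcases hs : PySem.List.sorted ((sentences.filter (fun s => decide (0 < ov s))).map (fun s => (ov s, s))) (fun p => p.1) true with _ | ⟨a, t⟩
    · rw [hs] at hhead; simp at hhead
    · rw [hs] at hhead; simp at hhead; rw [hhead]
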